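-- pv_equiv track=rewrite | github.com/aig-upf/pgp-landmarks | domain/generators/floyd.py | get_init
-- ===== SOURCE A (Python) =====
-- def get_init(num_dimension):
--
--    unconnected = [[1,2]]
--    for i in range(1, num_dimension):
--       aux = unconnected[-1]
--       unconnected.append([aux[0]+1,(aux[1]+2)%num_dimension])
--    if num_dimension <=3:
--       unconnected=[]
--
--    str_init="\n"
--    for i in range(1, num_dimension+1):
--          for j in range(1, num_dimension):
--             if (not [i,j] in unconnected) and (not [i,j+1] in unconnected):
--                str_init = str_init + "(connected v" + str(i) + "-" + str(j) + " v" + str(i) + "-" + str(j+1)+") "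
--                str_init = str_init + "(connected v" + str(i) + "-" + str(j+1) + " v" + str(i) + "-" + str(j)+") "
--          str_init = str_init + "\n"
--
--    str_init = str_init + "\n"
--
--    for i in range(1, num_dimension+1):
--          for j in range(1, num_dimension):
--             if (not [j,i] in unconnected) and (not [j+1,i] in unconnected):
--                str_init = str_init + "(connected v" + str(j) + "-" + str(i) + " v" + str(j+1) + "-" + str(i)+") "
--                str_init = str_init + "(connected v" + str(j+1) + "-" + str(i) + " v" + str(j) + "-" + str(i)+") "
--          str_init = str_init + "\n"
--
--    return(str_init)
-- ===== SOURCE B (Python) =====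
-- def get_init(num_dimension):
--     n = num_dimension
--
--     def edge(a1, b1, a2, b2):
--         return ("(connected v" + str(a1) + "-" + str(b1) +
--                 " v" + str(a2) + "-" + str(b2) + ") " +
--                 "(connected v" + str(a2) + "-" + str(b2) +
--                 " v" + str(a1) + "-" + str(b1) + ") ")
--
--     def blocked(a, b):
--         # cell (a, b) is removed from the grid iff n > 3 and b == (2*a) % n
--         return n > 3 and b == (2 * a) % n
--
--     row_lines = []
--     col_lines = []
--     for i in range(1, n + 1):
--         if n > 3:
--             # the single removed cell of row i sits at column c: the horizontal
--             # edges c-1 and c disappear, leaving two untested runs of edges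
--             c = (2 * i) % n
--             row = ("".join(edge(i, j, i, j + 1) for j in range(1, c - 1)) +
--                    "".join(edge(i, j, i, j + 1) for j in range(c + 1, n)))
--         else:
--             row = "".join(edge(i, j, i, j + 1) for j in range(1, n))
--         col = "".join(edge(j, i, j + 1, i) for j in range(1, n)
--                       if not blocked(j, i) and not blocked(j + 1, i))
--         row_lines.append(row)
--         col_lines.append(col)
--
--     return ("\n" + "".join(r + "\n" for r in row_lines) +
--             "\n" + "".join(c + "\n" for c in col_lines))
-- ===== Notes on version B (the rewrite author's own statement) =====
-- stated objective: faster
-- what changed: B drops A's precomputed 'unconnected' table and its linear membership scans entirely: it derives in closed form that row i loses exactly the cell at column (2*i)%n, emits each row's horizontal edges as two untested index runs around that gap, computes the vertical edges with an arithmetic predicate, and assembles everything in one fused pass over i (building row and column fragment lists simultaneously, joined at the end) instead of A's two staged accumulator loops.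
import Mathlib
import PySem

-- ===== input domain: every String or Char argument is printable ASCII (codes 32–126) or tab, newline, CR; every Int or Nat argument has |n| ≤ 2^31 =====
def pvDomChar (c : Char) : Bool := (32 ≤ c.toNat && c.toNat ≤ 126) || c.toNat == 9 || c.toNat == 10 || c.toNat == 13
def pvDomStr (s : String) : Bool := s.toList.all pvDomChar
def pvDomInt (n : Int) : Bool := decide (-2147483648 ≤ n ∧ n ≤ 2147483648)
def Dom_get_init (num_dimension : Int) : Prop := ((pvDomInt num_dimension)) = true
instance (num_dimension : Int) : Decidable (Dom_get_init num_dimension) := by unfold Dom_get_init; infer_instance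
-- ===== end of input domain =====

-- B removes A's precomputed `unconnected` table and its scans: row i's gap sits at column
-- (2*i)%n, so each row is emitted as two untested index runs, columns use an arithmetic
-- predicate, and one fused pass builds both fragment lists, joined at the end (objective: faster).

-- ===== PORT A =====
-- strings are built on the List Char side (PySem convention); str(i) = PySem.Int.toChars.
-- "(connected vA-B vC-D) " — the piece A appends per statement (two such pieces per edge)
def pvPieceA (a1 b1 a2 b2 : Int) : List Char :=
  "(connected v".toList ++ PySem.Int.toChars a1 ++ ['-'] ++ PySem.Int.toChars b1 ++
  " v".toList ++ PySem.Int.toChars a2 ++ ['-'] ++ PySem.Int.toChars b2 ++ [')', ' ']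

-- A's first loop: build `unconnected`, then clear it when num_dimension <= 3
def pvUnconn (num_dimension : Int) : List (List Int) :=
  let unconnected : List (List Int) :=
    (PySem.List.pyRange 1 num_dimension 1).foldl
      (fun acc _i =>
        let aux := (PySem.List.pyGet? acc (-1)).getD []
        acc ++ [[PySem.List.pyGetD aux 0 0 + 1,
                 PySem.Int.mod (PySem.List.pyGetD aux 1 0 + 2) num_dimension]])
      [[1, 2]]
  if num_dimension ≤ 3 then [] else unconnected

def get_init (num_dimension : Int) : String :=
  let unconnected := pvUnconn num_dimension
  let s0 : List Char := ['\n']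
  let s1 :=
    (PySem.List.pyRange 1 (num_dimension + 1) 1).foldl (fun s i =>
      ((PySem.List.pyRange 1 num_dimension 1).foldl (fun s j =>
        if !unconnected.contains [i, j] && !unconnected.contains [i, j + 1] then
          let s := s ++ pvPieceA i j i (j + 1)
          s ++ pvPieceA i (j + 1) i j
        else s) s) ++ ['\n']) s0
  let s2 := s1 ++ ['\n']
  let s3 :=
    (PySem.List.pyRange 1 (num_dimension + 1) 1).foldl (fun s i =>
      ((PySem.List.pyRange 1 num_dimension 1).foldl (fun s j =>
        if !unconnected.contains [j, i] && !unconnected.contains [j + 1, i] then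
          let s := s ++ pvPieceA j i (j + 1) i
          s ++ pvPieceA (j + 1) i j i
        else s) s) ++ ['\n']) s2
  String.ofList s3

-- ===== PORT B =====
-- Source B's edge(a1,b1,a2,b2): both directions in one string
def pvEdgeB (a1 b1 a2 b2 : Int) : List Char :=
  "(connected v".toList ++ PySem.Int.toChars a1 ++ ['-'] ++ PySem.Int.toChars b1 ++
  " v".toList ++ PySem.Int.toChars a2 ++ ['-'] ++ PySem.Int.toChars b2 ++
  ") (connected v".toList ++ PySem.Int.toChars a2 ++ ['-'] ++ PySem.Int.toChars b2 ++
  " v".toList ++ PySem.Int.toChars a1 ++ ['-'] ++ PySem.Int.toChars b1 ++ [')', ' ']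

-- Source B's blocked(a,b): cell (a,b) is removed iff n > 3 and b == (2*a) % n
def pvBlocked (n a b : Int) : Bool :=
  decide (3 < n) && decide (b = PySem.Int.mod (2 * a) n)

-- row i of Source B: two untested runs of horizontal edges around the gap column c = (2*i)%n
def pvRowLine (n i : Int) : List Char :=
  if 3 < n then
    let c := PySem.Int.mod (2 * i) n
    ((PySem.List.pyRange 1 (c - 1) 1).map (fun j => pvEdgeB i j i (j + 1))).flatten ++
    ((PySem.List.pyRange (c + 1) n 1).map (fun j => pvEdgeB i j i (j + 1))).flatten
  else
    ((PySem.List.pyRange 1 n 1).map (fun j => pvEdgeB i j i (j + 1))).flatten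

-- column i of Source B: join over the filtered comprehension
def pvColLine (n i : Int) : List Char :=
  (((PySem.List.pyRange 1 n 1).filter
      (fun j => !pvBlocked n j i && !pvBlocked n (j + 1) i)).map
    (fun j => pvEdgeB j i (j + 1) i)).flatten

-- the fused loop: one pass over i appending to both fragment lists, then the final join
def get_init_alt (num_dimension : Int) : String :=
  let n := num_dimension
  let lines :=
    (PySem.List.pyRange 1 (n + 1) 1).foldl
      (fun (acc : List (List Char) × List (List Char)) i =>
        (acc.1 ++ [pvRowLine n i], acc.2 ++ [pvColLine n i]))
      ([], [])
  String.ofList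
    (['\n'] ++ (lines.1.map (fun r => r ++ ['\n'])).flatten ++
     ['\n'] ++ (lines.2.map (fun c => c ++ ['\n'])).flatten)

-- ===== PRECONDITION & SPEC =====
def Spec_get_init (num_dimension : Int) (out : String) : Prop := out = get_init_alt num_dimension
instance (num_dimension : Int) (out : String) : Decidable (Spec_get_init num_dimension out) := by unfold Spec_get_init; infer_instance

-- ===== CLAIM (what is proved, stated in full; the proofs are below) =====
def Claim_equal_get_init : Prop := ∀ (num_dimension : Int), Dom_get_init num_dimension → Spec_get_init num_dimension (get_init num_dimension)

-- ===== LEMMAS AND PROOFS =====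

-- A's table after m loop iterations, in closed form (modulus n ≥ 3): entry k is [k, (2*k) % n]
theorem pvUnconn_fold (n : Int) (hn : 3 ≤ n) (m : Nat) :
    (PySem.List.pyRange 1 (1 + (m : Int)) 1).foldl
      (fun acc _i =>
        let aux := (PySem.List.pyGet? acc (-1)).getD []
        acc ++ [[PySem.List.pyGetD aux 0 0 + 1,
                 PySem.Int.mod (PySem.List.pyGetD aux 1 0 + 2) n]])
      [[1, 2]]
    = (PySem.List.pyRange 1 (2 + (m : Int)) 1).map
        (fun k => [k, PySem.Int.mod (2 * k) n]) := by
  induction m with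
  | zero =>
    rw [show ((1 : Int) + ((0 : Nat) : Int)) = 1 by norm_num,
        show ((2 : Int) + ((0 : Nat) : Int)) = 1 + 1 by norm_num,
        PySem.List.pyRange_one_eq_nil (le_refl 1),
        PySem.List.pyRange_one_singleton]
    simp only [List.foldl_nil, List.map_cons, List.map_nil]
    rw [PySem.Int.mod_eq_emod_of_pos (by omega : (0:Int) < n),
        Int.emod_eq_of_lt (by norm_num) (by omega)]
    norm_num
  | succ m ih =>
    have hsplit : PySem.List.pyRange 1 (1 + ((m + 1 : Nat) : Int)) 1
        = PySem.List.pyRange 1 (1 + (m : Int)) 1 ++ [1 + (m : Int)] := by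
      rw [show ((1 : Int) + ((m + 1 : Nat) : Int)) = (1 + (m : Int)) + 1 by push_cast; ring]
      exact PySem.List.pyRange_one_succ_right (by omega)
    have hsplit' : PySem.List.pyRange 1 (2 + ((m + 1 : Nat) : Int)) 1
        = PySem.List.pyRange 1 (2 + (m : Int)) 1 ++ [2 + (m : Int)] := by
      rw [show ((2 : Int) + ((m + 1 : Nat) : Int)) = (2 + (m : Int)) + 1 by push_cast; ring]
      exact PySem.List.pyRange_one_succ_right (by omega)
    have hsplitR : PySem.List.pyRange 1 (2 + (m : Int)) 1
        = PySem.List.pyRange 1 (1 + (m : Int)) 1 ++ [1 + (m : Int)] := by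
      rw [show ((2 : Int) + (m : Int)) = (1 + (m : Int)) + 1 by ring]
      exact PySem.List.pyRange_one_succ_right (by omega)
    rw [hsplit, List.foldl_append, ih, hsplit', hsplitR]
    simp only [List.map_append, List.foldl_cons, List.foldl_nil, List.map_cons, List.map_nil,
      PySem.List.pyGet?_neg_one_append_singleton, Option.getD_some, List.append_assoc]
    congr 2
    norm_num [PySem.List.pyGetD, PySem.List.pyGet?, PySem.List.pyIdx?]
    have hpos : (0 : Int) < n := by omega
    rw [PySem.Int.mod_eq_emod_of_pos hpos, PySem.Int.mod_eq_emod_of_pos hpos,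
        PySem.Int.mod_eq_emod_of_pos hpos, Int.emod_add_emod]
    constructor
    · ring
    · congr 1; ring

-- the same, with the loop range written as A writes it (range(1, n))
theorem pvUnconn_closed (n : Int) (h3 : ¬ n ≤ 3) :
    pvUnconn n
      = (PySem.List.pyRange 1 (n + 1) 1).map (fun k => [k, PySem.Int.mod (2 * k) n]) := by
  have h := pvUnconn_fold n (by omega) (n - 1).toNat
  rw [show ((1 : Int) + (((n - 1).toNat : Nat) : Int)) = n by omega,
      show ((2 : Int) + (((n - 1).toNat : Nat) : Int)) = n + 1 by omega] at h
  unfold pvUnconn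
  simp only [h3, if_false]
  exact h

-- membership in A's table equals B's closed-form test, for the row bounds 1 ≤ a ≤ n
-- that every membership test A performs satisfies
theorem contains_pvUnconn (n a b : Int) (ha1 : 1 ≤ a) (ha2 : a ≤ n) :
    (pvUnconn n).contains [a, b] = pvBlocked n a b := by
  by_cases h3 : n ≤ 3
  · simp [pvUnconn, h3, pvBlocked, show ¬ (3 < n) by omega]
  · rw [pvUnconn_closed n h3]
    have hiff : ([a, b] ∈ (PySem.List.pyRange 1 (n + 1) 1).map
        (fun k => [k, PySem.Int.mod (2 * k) n])) ↔ b = PySem.Int.mod (2 * a) n := by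
      rw [List.mem_map]
      constructor
      · rintro ⟨x, _, he⟩
        simp only [List.cons.injEq, and_true] at he
        rw [← he.1]; exact he.2.symm
      · intro hb
        exact ⟨a, PySem.List.mem_pyRange_one.2 ⟨ha1, by omega⟩, by rw [hb]⟩
    simp [List.contains_eq_mem, hiff, pvBlocked, show (3:Int) < n by omega]

-- comprehension shape: flatMap of a guarded chunk = flatten of filter+map
theorem flatMap_ite_eq_filter_map (l : List Int) (c : Int → Bool) (e : Int → List Char) :
    l.flatMap (fun j => if c j then e j else []) = ((l.filter c).map e).flatten := by
  induction l with
  | nil => simp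
  | cons x xs ih => by_cases hc : c x <;> simp [hc, ih]

-- A's two appended pieces per edge = B's edge string
theorem piece_eq_edge (a1 b1 a2 b2 : Int) :
    (s ++ pvPieceA a1 b1 a2 b2) ++ pvPieceA a2 b2 a1 b1 = s ++ pvEdgeB a1 b1 a2 b2 := by
  unfold pvPieceA pvEdgeB
  rw [show (") (connected v".toList : List Char)
      = [')', ' '] ++ "(connected v".toList from by decide]
  simp [List.append_assoc]

-- one block of A (a double loop appending onto the accumulator) rewritten as
-- "accumulator ++ flatten of per-row chunks"
theorem block_shape (n : Int) (c : Int → Int → Bool) (e : Int → Int → List Char)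
    (s : List Char) :
    (PySem.List.pyRange 1 (n + 1) 1).foldl (fun s i =>
        ((PySem.List.pyRange 1 n 1).foldl (fun s j =>
          if c i j then s ++ e i j else s) s) ++ ['\n']) s
      = s ++ ((PySem.List.pyRange 1 (n + 1) 1).map (fun i =>
          ((PySem.List.pyRange 1 n 1).flatMap (fun j =>
            if c i j then e i j else []) ++ ['\n']))).flatten := by
  have hinner : ∀ (i : Int) (s : List Char), (PySem.List.pyRange 1 n 1).foldl (fun s j =>
      if c i j then s ++ e i j else s) s
      = s ++ (PySem.List.pyRange 1 n 1).flatMap (fun j =>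
          if c i j then e i j else []) := by
    intro i s
    rw [show (fun (s : List Char) (j : Int) => if c i j then s ++ e i j else s)
        = fun s j => s ++ (if c i j then e i j else []) from by
      funext s j; by_cases hc : c i j <;> simp [hc]]
    exact PySem.List.foldl_append_eq_flatMap _ _ _
  rw [show (fun (s : List Char) (i : Int) =>
      ((PySem.List.pyRange 1 n 1).foldl (fun s j =>
        if c i j then s ++ e i j else s) s) ++ ['\n'])
      = fun s i => s ++ ((PySem.List.pyRange 1 n 1).flatMap (fun j =>
          if c i j then e i j else []) ++ ['\n']) from by
    funext s i; rw [hinner, List.append_assoc]]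
  rw [PySem.List.foldl_append_eq_flatMap, List.flatMap_def]

-- B's fused two-accumulator fold, in map form
theorem fold_pair (l : List Int) (f g : Int → List Char)
    (r0 c0 : List (List Char)) :
    l.foldl (fun (acc : List (List Char) × List (List Char)) i =>
        (acc.1 ++ [f i], acc.2 ++ [g i])) (r0, c0)
      = (r0 ++ l.map f, c0 ++ l.map g) := by
  induction l generalizing r0 c0 with
  | nil => simp
  | cons x xs ih => simp [ih]

-- A's per-row guarded flatMap is B's two untested runs around the gap column
theorem rowline_eq (n i : Int) (hi1 : 1 ≤ i) (hi2 : i ≤ n) :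
    (PySem.List.pyRange 1 n 1).flatMap (fun j =>
        if !(pvUnconn n).contains [i, j] && !(pvUnconn n).contains [i, j + 1] then
          pvEdgeB i j i (j + 1) else [])
      = pvRowLine n i := by
  have hcond : ∀ j, (!(pvUnconn n).contains [i, j] && !(pvUnconn n).contains [i, j + 1])
      = (!pvBlocked n i j && !pvBlocked n i (j + 1)) := by
    intro j
    rw [contains_pvUnconn n i j hi1 hi2, contains_pvUnconn n i (j + 1) hi1 hi2]
  simp only [hcond]
  by_cases h3 : 3 < n
  · -- the gap column c, with 0 ≤ c < n
    set c := PySem.Int.mod (2 * i) n with hc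
    have hn0 : (0 : Int) < n := by omega
    have hcb : 0 ≤ c ∧ c < n := by
      rw [hc, PySem.Int.mod_eq_emod_of_pos hn0]
      exact ⟨Int.emod_nonneg _ (by omega), Int.emod_lt_of_pos _ hn0⟩
    have hblk : ∀ a b : Int, a = i → pvBlocked n a b = decide (b = c) := by
      intro a b ha; rw [ha]; simp [pvBlocked, h3, hc]
    rw [flatMap_ite_eq_filter_map]
    have hfil : (PySem.List.pyRange 1 n 1).filter
        (fun j => !pvBlocked n i j && !pvBlocked n i (j + 1))
        = PySem.List.pyRange 1 (c - 1) 1 ++ PySem.List.pyRange (c + 1) n 1 := by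
      have hp : ∀ j : Int, (!pvBlocked n i j && !pvBlocked n i (j + 1))
          = decide (j ≠ c ∧ j ≠ c - 1) := by
        intro j
        rw [hblk i j rfl, hblk i (j + 1) rfl]
        by_cases h1 : j = c <;> by_cases h2 : j = c - 1 <;> simp [h1, h2] <;> try omega
      simp only [hp]
      by_cases hc2 : 2 ≤ c
      · rw [PySem.List.pyRange_one_append 1 (c - 1) n (by omega) (by omega),
            PySem.List.pyRange_one_append (c - 1) (c + 1) n (by omega) (by omega)]
        rw [show PySem.List.pyRange (c - 1) (c + 1) 1 = [c - 1, c] from by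
          rw [PySem.List.pyRange_one_cons (by omega),
              show c - 1 + 1 = c by ring, PySem.List.pyRange_one_cons (by omega),
              PySem.List.pyRange_one_eq_nil (by omega)]]
        simp only [List.filter_append]
        rw [List.filter_eq_self.mpr (by
          intro j hj; rw [PySem.List.mem_pyRange_one] at hj
          simp only [ne_eq, decide_eq_true_eq]; omega)]
        rw [show List.filter (fun j => decide (j ≠ c ∧ j ≠ c - 1)) [c - 1, c] = [] from by
          simp]
        rw [List.filter_eq_self.mpr (by
          intro j hj; rw [PySem.List.mem_pyRange_one] at hj
          simp only [ne_eq, decide_eq_true_eq]; omega)]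
        simp
      · by_cases hc1 : c = 1
        · rw [hc1, PySem.List.pyRange_one_append 1 2 n (by omega) (by omega),
              show PySem.List.pyRange 1 2 1 = [1] from PySem.List.pyRange_one_singleton 1]
          simp only [List.filter_append]
          rw [show List.filter (fun j => decide (j ≠ 1 ∧ j ≠ 1 - 1)) [(1:Int)] = [] from by
            simp]
          rw [List.filter_eq_self.mpr (by
            intro j hj; rw [PySem.List.mem_pyRange_one] at hj
            simp only [ne_eq, decide_eq_true_eq]; omega)]
          rw [show PySem.List.pyRange 1 (1 - 1) 1 = [] from
            PySem.List.pyRange_one_eq_nil (by omega)]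
          simp
        · have hc0 : c = 0 := by omega
          rw [List.filter_eq_self.mpr (by
            intro j hj; rw [PySem.List.mem_pyRange_one] at hj
            simp only [ne_eq, decide_eq_true_eq]; omega)]
          rw [hc0, show PySem.List.pyRange 1 (0 - 1) 1 = [] from
            PySem.List.pyRange_one_eq_nil (by omega)]
          simp
    rw [hfil]
    unfold pvRowLine
    simp only [h3, if_true, List.map_append, List.flatten_append]
    rw [← hc]
  · -- n ≤ 3: nothing is blocked, one plain run
    have hb : ∀ a b : Int, pvBlocked n a b = false := by
      intro a b; simp [pvBlocked, h3]
    simp only [hb, Bool.not_false, Bool.and_self, if_true]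
    rw [List.flatMap_def]
    unfold pvRowLine
    simp only [h3, if_false]

-- ===== VERDICT (by name: the statement is the Claim_ definition above) =====
theorem get_init_spec : Claim_equal_get_init := by
  intro n _
  unfold Spec_get_init
  show get_init n = get_init_alt n
  unfold get_init get_init_alt
  simp only [piece_eq_edge]
  simp only [block_shape]
  rw [fold_pair]
  simp only [List.nil_append, List.map_map]
  have hrow : (PySem.List.pyRange 1 (n + 1) 1).map (fun i =>
      ((PySem.List.pyRange 1 n 1).flatMap (fun j =>
        if !(pvUnconn n).contains [i, j] && !(pvUnconn n).contains [i, j + 1] then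
          pvEdgeB i j i (j + 1) else []) ++ ['\n']))
      = (PySem.List.pyRange 1 (n + 1) 1).map
          ((fun r => r ++ ['\n']) ∘ fun i => pvRowLine n i) := by
    apply List.map_congr_left
    intro i hi
    rw [PySem.List.mem_pyRange_one] at hi
    simp only [Function.comp]
    rw [rowline_eq n i hi.1 (by omega)]
  have hcol : (PySem.List.pyRange 1 (n + 1) 1).map (fun i =>
      ((PySem.List.pyRange 1 n 1).flatMap (fun j =>
        if !(pvUnconn n).contains [j, i] && !(pvUnconn n).contains [j + 1, i] then
          pvEdgeB j i (j + 1) i else []) ++ ['\n']))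
      = (PySem.List.pyRange 1 (n + 1) 1).map
          ((fun c => c ++ ['\n']) ∘ fun i => pvColLine n i) := by
    apply List.map_congr_left
    intro i hi
    simp only [Function.comp]
    congr 1
    rw [flatMap_ite_eq_filter_map]
    unfold pvColLine
    congr 1
    apply congrArg
    apply List.filter_congr
    intro j hj
    rw [PySem.List.mem_pyRange_one] at hj
    rw [contains_pvUnconn n j i hj.1 (by omega),
        contains_pvUnconn n (j + 1) i (by omega) (by omega)]
  rw [hrow, hcol]
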